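-- pv_equiv track=rewrite | github.com/merge-debug-consult/copy-writer-demo | src/voices.py | get_target_range
-- ===== SOURCE A (Python) =====
-- BRAND_PRESETS: dict[str, dict] = {
--     "scott_dunn": {
--         "tone": "aspirational_warm",
--         "audience": "couples_friends",
--         "formality": "elegant_editorial",
--         "detail_style": "sensory_evocative",
--         "target_min": 50,
--         "target_max": 65,
--         "label": "Scott Dunn",
--     },
--     "sd_private": {
--         "tone": "understated_confident",
--         "audience": "uhnw_individuals",
--         "formality": "refined_discreet",
--         "detail_style": "minimal_declarative",
--         "target_min": 40,
--         "target_max": 55,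
--         "label": "Scott Dunn Private",
--     },
--     "explorers": {
--         "tone": "joyful_reassuring",
--         "audience": "parents_families",
--         "formality": "conversational_energetic",
--         "detail_style": "practical_trust_building",
--         "target_min": 60,
--         "target_max": 75,
--         "label": "Explorers",
--     },
--     "black_tomato": {
--         "tone": "philosophical_emotional",
--         "audience": "curious_seekers",
--         "formality": "poetic_punchy",
--         "detail_style": "contextual_philosophical",
--         "target_min": 55,
--         "target_max": 70,
--         "label": "Competitor: Black Tomato",
--     },
-- }
--
-- _DEFAULT_TARGET = (50, 65)
--
-- def get_target_range(
--     tone: str, audience: str, formality: str, detail_style: str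
-- ) -> tuple[int, int]:
--     """Return (min, max) Flesch Reading Ease target for this style combination."""
--     for preset in BRAND_PRESETS.values():
--         if (
--             preset["tone"] == tone
--             and preset["audience"] == audience
--             and preset["formality"] == formality
--             and preset["detail_style"] == detail_style
--         ):
--             return (preset["target_min"], preset["target_max"])
--
--     return _DEFAULT_TARGET
-- ===== SOURCE B (Python) =====
-- BRAND_PRESETS: dict[str, dict] = {
--     "scott_dunn": {
--         "tone": "aspirational_warm",
--         "audience": "couples_friends",
--         "formality": "elegant_editorial",
--         "detail_style": "sensory_evocative",
--         "target_min": 50,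
--         "target_max": 65,
--         "label": "Scott Dunn",
--     },
--     "sd_private": {
--         "tone": "understated_confident",
--         "audience": "uhnw_individuals",
--         "formality": "refined_discreet",
--         "detail_style": "minimal_declarative",
--         "target_min": 40,
--         "target_max": 55,
--         "label": "Scott Dunn Private",
--     },
--     "explorers": {
--         "tone": "joyful_reassuring",
--         "audience": "parents_families",
--         "formality": "conversational_energetic",
--         "detail_style": "practical_trust_building",
--         "target_min": 60,
--         "target_max": 75,
--         "label": "Explorers",
--     },
--     "black_tomato": {
--         "tone": "philosophical_emotional",
--         "audience": "curious_seekers",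
--         "formality": "poetic_punchy",
--         "detail_style": "contextual_philosophical",
--         "target_min": 55,
--         "target_max": 70,
--         "label": "Competitor: Black Tomato",
--     },
-- }
--
-- _DEFAULT_TARGET = (50, 65)
--
-- # Index built once: (tone, audience, formality, detail_style) -> (target_min, target_max)
-- _INDEX = {
--     (p["tone"], p["audience"], p["formality"], p["detail_style"]): (
--         p["target_min"],
--         p["target_max"],
--     )
--     for p in BRAND_PRESETS.values()
-- }
--
--
-- def get_target_range(
--     tone: str, audience: str, formality: str, detail_style: str
-- ) -> tuple[int, int]:
--     """Return (min, max) Flesch Reading Ease target for this style combination."""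
--     return _INDEX.get((tone, audience, formality, detail_style), _DEFAULT_TARGET)
-- ===== Notes on version B (the rewrite author's own statement) =====
-- stated objective: idiomatic
-- what changed: Replaced the per-call linear scan over BRAND_PRESETS with its four-way equality conjunction by a module-level index dict keyed by the (tone, audience, formality, detail_style) tuple, so each call is a single dict lookup with the default as fallback.
import Mathlib
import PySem

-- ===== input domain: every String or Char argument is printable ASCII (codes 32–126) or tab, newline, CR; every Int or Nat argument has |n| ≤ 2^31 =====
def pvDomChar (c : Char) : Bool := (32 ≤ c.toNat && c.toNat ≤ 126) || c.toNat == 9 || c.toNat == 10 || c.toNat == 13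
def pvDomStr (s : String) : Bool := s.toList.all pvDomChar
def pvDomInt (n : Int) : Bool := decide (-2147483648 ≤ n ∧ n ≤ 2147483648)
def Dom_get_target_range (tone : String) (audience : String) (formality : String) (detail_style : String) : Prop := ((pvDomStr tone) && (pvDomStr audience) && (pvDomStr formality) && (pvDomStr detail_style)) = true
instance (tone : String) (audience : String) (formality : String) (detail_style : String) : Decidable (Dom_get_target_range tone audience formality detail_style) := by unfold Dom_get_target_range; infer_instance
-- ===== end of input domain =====

-- B replaces A's per-call linear scan (four-way conjunction per preset) by a prebuilt
-- index dict keyed by the 4-tuple, looked up once per call (objective: idiomatic).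
-- ===== PORT A =====
-- a preset dict mixes str and int values, so it is ported by hand as a structure (exact:
-- only these fixed keys are ever read, each with a fixed type)
structure PvPreset where
  tone : String
  audience : String
  formality : String
  detail_style : String
  target_min : Int
  target_max : Int
  label : String
deriving Repr, DecidableEq

def pvBrandPresetsValues : List PvPreset :=
  [ ⟨"aspirational_warm", "couples_friends", "elegant_editorial", "sensory_evocative", 50, 65, "Scott Dunn"⟩,
    ⟨"understated_confident", "uhnw_individuals", "refined_discreet", "minimal_declarative", 40, 55, "Scott Dunn Private"⟩,
    ⟨"joyful_reassuring", "parents_families", "conversational_energetic", "practical_trust_building", 60, 75, "Explorers"⟩,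
    ⟨"philosophical_emotional", "curious_seekers", "poetic_punchy", "contextual_philosophical", 55, 70, "Competitor: Black Tomato"⟩ ]

def pvDefaultTarget : Int × Int := (50, 65)

-- the for-loop with early return, as structural recursion over the values list
def pvScan (tone audience formality detail_style : String) : List PvPreset → Int × Int
  | [] => pvDefaultTarget
  | p :: rest =>
      if p.tone = tone ∧ p.audience = audience ∧ p.formality = formality ∧ p.detail_style = detail_style then
        (p.target_min, p.target_max)
      else
        pvScan tone audience formality detail_style rest

def get_target_range (tone : String) (audience : String) (formality : String) (detail_style : String) : Int × Int :=
  pvScan tone audience formality detail_style pvBrandPresetsValues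

-- ===== PORT B =====
-- the module-level index dict: (tone, audience, formality, detail_style) -> (min, max)
def pvIndex : PySem.Dict (String × String × String × String) (Int × Int) :=
  PySem.Dict.ofList
    [ (("aspirational_warm", "couples_friends", "elegant_editorial", "sensory_evocative"), (50, 65)),
      (("understated_confident", "uhnw_individuals", "refined_discreet", "minimal_declarative"), (40, 55)),
      (("joyful_reassuring", "parents_families", "conversational_energetic", "practical_trust_building"), (60, 75)),
      (("philosophical_emotional", "curious_seekers", "poetic_punchy", "contextual_philosophical"), (55, 70)) ]

def get_target_range_alt (tone : String) (audience : String) (formality : String) (detail_style : String) : Int × Int :=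
  pvIndex.getD (tone, audience, formality, detail_style) (50, 65)

-- ===== PRECONDITION & SPEC =====
def Spec_get_target_range (tone : String) (audience : String) (formality : String) (detail_style : String) (out : Int × Int) : Prop := out = get_target_range_alt tone audience formality detail_style
instance (tone : String) (audience : String) (formality : String) (detail_style : String) (out : Int × Int) : Decidable (Spec_get_target_range tone audience formality detail_style out) := by unfold Spec_get_target_range; infer_instance

-- ===== CLAIM (what is proved, stated in full; the proofs are below) =====
def Claim_equal_get_target_range : Prop := ∀ (tone : String) (audience : String) (formality : String) (detail_style : String), Dom_get_target_range tone audience formality detail_style → Spec_get_target_range tone audience formality detail_style (get_target_range tone audience formality detail_style)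

-- ===== LEMMAS AND PROOFS =====

-- ===== VERDICT (by name: the statement is the Claim_ definition above) =====
-- pvIndex evaluated: ofList of distinct keys is the literal association list
theorem pvIndex_eq : pvIndex = PySem.Dict.mk
    [ (("aspirational_warm", "couples_friends", "elegant_editorial", "sensory_evocative"), (50, 65)),
      (("understated_confident", "uhnw_individuals", "refined_discreet", "minimal_declarative"), (40, 55)),
      (("joyful_reassuring", "parents_families", "conversational_energetic", "practical_trust_building"), (60, 75)),
      (("philosophical_emotional", "curious_seekers", "poetic_punchy", "contextual_philosophical"), (55, 70)) ] := by
  decide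

theorem get_target_range_spec : Claim_equal_get_target_range := by
  intro tone audience formality detail_style _
  unfold Spec_get_target_range get_target_range get_target_range_alt
  rw [pvIndex_eq]
  simp only [pvBrandPresetsValues, pvScan, PySem.Dict.getD, PySem.Dict.get?_mk_cons,
    pvDefaultTarget, beq_iff_eq]
  split_ifs <;> simp_all [PySem.Dict.get?, eq_comm]
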